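-- pv_equiv track=rewrite | github.com/goepigen/6.1010-Fundamentals-of-Programming | Labs/lab 8 - sat/lab.py | no_oversubscribed_rooms
-- ===== SOURCE A (Python) =====
-- def combinations(lst, k):
--     if k == 0:
--         yield []
--     elif len(lst) < k:
--         return
--     else:
--         first, rest = lst[0], lst[1:]
--         for c in combinations(rest, k - 1):
--             yield [first] + c
--         yield from combinations(rest, k)
--
-- def no_oversubscribed_rooms(student_preferences, room_capacities):
--     students = list(student_preferences)
--     n_students = len(students)
--     rooms = [r for r, cap in room_capacities.items() if cap < n_students]
--
--     return [
--         [(f"{s}_{r}", False) for s in student_combinations]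
--         for r in rooms
--         for student_combinations in combinations(students, room_capacities[r] + 1)
--     ]
-- ===== SOURCE B (Python) =====
-- def _combos(lst, k):
--     # All k-element combinations of lst in lexicographic order, computed by a
--     # right-to-left DP over suffixes: table[j] = the j-subsets of the suffix seen so far.
--     if k < 0:
--         return []
--     table = [[[]]] + [[] for _ in range(k)]
--     for x in reversed(lst):
--         table = [table[0]] + [
--             [[x] + c for c in prev] + cur for prev, cur in zip(table, table[1:])
--         ]
--     return table[k]
--
--
-- def no_oversubscribed_rooms(student_preferences, room_capacities):
--     students = list(student_preferences)
--     n = len(students)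
--     clauses = []
--     for room, cap in room_capacities.items():
--         if cap < n:
--             for combo in _combos(students, cap + 1):
--                 clauses.append([(f"{s}_{room}", False) for s in combo])
--     return clauses
-- ===== Notes on version B (the rewrite author's own statement) =====
-- stated objective: alternative
-- what changed: Replaces A's doubly-recursive combinations generator with a right-to-left DP table holding all j-subsets (j <= cap+1) of the suffix processed so far, and replaces the nested rooms/lookup comprehension by a single accumulating pass over room_capacities.items() using each entry's own capacity.
-- outside the precondition, e.g. on no_oversubscribed_rooms({}, {'r': -2}): A raises IndexError, B returns []
import Mathlib
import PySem

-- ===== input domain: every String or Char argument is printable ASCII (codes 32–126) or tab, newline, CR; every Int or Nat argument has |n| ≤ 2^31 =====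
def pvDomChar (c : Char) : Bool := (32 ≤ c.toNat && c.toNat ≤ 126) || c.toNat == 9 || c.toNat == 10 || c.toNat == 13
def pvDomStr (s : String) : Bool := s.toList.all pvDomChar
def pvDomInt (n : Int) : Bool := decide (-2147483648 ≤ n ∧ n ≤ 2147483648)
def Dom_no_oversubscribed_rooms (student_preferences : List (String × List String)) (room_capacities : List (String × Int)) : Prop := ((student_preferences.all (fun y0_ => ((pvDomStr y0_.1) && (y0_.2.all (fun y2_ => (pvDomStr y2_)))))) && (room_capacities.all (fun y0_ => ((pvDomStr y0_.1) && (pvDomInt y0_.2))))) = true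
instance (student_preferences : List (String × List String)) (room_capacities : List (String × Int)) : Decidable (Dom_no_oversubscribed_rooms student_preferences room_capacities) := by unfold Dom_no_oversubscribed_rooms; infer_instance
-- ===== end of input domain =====

-- B replaces A's recursive `combinations` generator by a right-to-left DP table of all
-- j-subsets (j ≤ k) and an explicit accumulating loop over the rooms (objective: alternative).

-- ===== PORT A =====
-- A's recursive generator `combinations`; the `[] => []` arm of the match is the point where
-- Python evaluates lst[0] on an empty list and raises IndexError (reachable only for k < 0,
-- i.e. a capacity ≤ -2, excluded by Pre_).
def pvCombA (lst : List String) (k : Int) : List (List String) :=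
  if k = 0 then [[]]
  else if (lst.length : Int) < k then []
  else
    match lst with
    | [] => []
    | first :: rest =>
        (pvCombA rest (k - 1)).map (fun c => first :: c) ++ pvCombA rest k

def no_oversubscribed_rooms (student_preferences : List (String × List String)) (room_capacities : List (String × Int)) : List (List (String × Bool)) :=
  -- students = list(student_preferences): the dict's keys in insertion order
  let students := student_preferences.map Prod.fst
  let n_students := students.length
  -- rooms = [r for r, cap in room_capacities.items() if cap < n_students]
  let rooms := (room_capacities.filter (fun p => p.2 < (n_students : Int))).map Prod.fst
  -- the comprehension; room_capacities[r] is the dict lookup (key always present here)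
  rooms.flatMap (fun r =>
    (pvCombA students ((room_capacities.lookup r).getD 0 + 1)).map (fun combo =>
      combo.map (fun s => (s ++ "_" ++ r, false))))

-- ===== PORT B =====
-- one DP step: table = [table[0]] + [[ [x]+c for c in prev ] + cur for prev, cur in zip(table, table[1:])]
def pvStep (x : String) (t : List (List (List String))) : List (List (List String)) :=
  match t with
  | [] => []
  | h :: rest =>
      h :: List.zipWith (fun prev cur => prev.map (fun c => x :: c) ++ cur) (h :: rest) rest

def pvCombB (lst : List String) (k : Int) : List (List String) :=
  if k < 0 then []
  else
    -- table = [[[]]] + [[] for _ in range(k)]; for x in reversed(lst): table = step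
    let table := lst.foldr pvStep ([[]] :: List.replicate k.toNat [])
    -- return table[k]; 0 ≤ k here and the table always has k+1 entries, so the index is exact
    table.getD k.toNat []

def no_oversubscribed_rooms_alt (student_preferences : List (String × List String)) (room_capacities : List (String × Int)) : List (List (String × Bool)) :=
  let students := student_preferences.map Prod.fst
  let n := students.length
  room_capacities.foldl (fun clauses p =>
    if p.2 < (n : Int) then
      clauses ++ (pvCombB students (p.2 + 1)).map (fun combo =>
        combo.map (fun s => (s ++ "_" ++ p.1, false)))
    else clauses) []

-- ===== PRECONDITION & SPEC =====
-- Pre_ excludes (a) association lists with duplicate room keys — unrepresentable as the Python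
-- dict, where A's repeated first-match lookup and B's per-entry capacity are equally defensible —
-- and (b) any room of capacity ≤ -2, on which A's `combinations` raises IndexError.
def Pre_no_oversubscribed_rooms (student_preferences : List (String × List String)) (room_capacities : List (String × Int)) : Prop :=
  (room_capacities.map Prod.fst).Nodup ∧ ∀ p ∈ room_capacities, -1 ≤ p.2
instance (student_preferences : List (String × List String)) (room_capacities : List (String × Int)) : Decidable (Pre_no_oversubscribed_rooms student_preferences room_capacities) := by unfold Pre_no_oversubscribed_rooms; infer_instance

def pvWitness_no_oversubscribed_rooms : (List (String × List String)) × (List (String × Int)) :=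
  ([("alice", ["r1"]), ("bob", ["r1"])], [("r1", 1), ("r2", 0)])

def Spec_no_oversubscribed_rooms (student_preferences : List (String × List String)) (room_capacities : List (String × Int)) (out : List (List (String × Bool))) : Prop := out = no_oversubscribed_rooms_alt student_preferences room_capacities
instance (student_preferences : List (String × List String)) (room_capacities : List (String × Int)) (out : List (List (String × Bool))) : Decidable (Spec_no_oversubscribed_rooms student_preferences room_capacities out) := by unfold Spec_no_oversubscribed_rooms; infer_instance

-- ===== CLAIM (what is proved, stated in full; the proofs are below) =====
def Claim_equal_no_oversubscribed_rooms : Prop := ∀ (student_preferences : List (String × List String)) (room_capacities : List (String × Int)), Dom_no_oversubscribed_rooms student_preferences room_capacities → Pre_no_oversubscribed_rooms student_preferences room_capacities → Spec_no_oversubscribed_rooms student_preferences room_capacities (no_oversubscribed_rooms student_preferences room_capacities)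


-- ===== LEMMAS AND PROOFS =====

lemma pvCombA_short (lst : List String) (k : Int) (h : (lst.length : Int) < k) :
    pvCombA lst k = [] := by
  have hk : k ≠ 0 := by have : (0 : Int) ≤ lst.length := by positivity
                        omega
  rw [pvCombA.eq_def, if_neg hk, if_pos h]

lemma pvCombA_zero (lst : List String) : pvCombA lst 0 = [[]] := by
  rw [pvCombA.eq_def]; simp

lemma pvCombA_cons (x : String) (rest : List String) (k : Int) (hk : k ≠ 0)
    (hlen : ¬ ((x :: rest).length : Int) < k) :
    pvCombA (x :: rest) k = (pvCombA rest (k - 1)).map (fun c => x :: c) ++ pvCombA rest k := by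
  rw [pvCombA.eq_def, if_neg hk, if_neg hlen]

lemma pvTable_spec (lst : List String) (m : Nat) :
    lst.foldr pvStep ([[]] :: List.replicate m []) =
      (List.range (m + 1)).map (fun (j : Nat) => pvCombA lst (j : Int)) := by
  induction lst with
  | nil =>
      apply List.ext_getElem
      · simp
      · intro i h1 h2
        rcases i with _ | j
        · simp [pvCombA_zero]
        · simp only [List.foldr_nil, List.getElem_cons_succ, List.getElem_replicate,
            List.getElem_map, List.getElem_range]
          symm
          apply pvCombA_short
          simp
  | cons x rest ih =>
      rw [List.foldr_cons, ih]
      have hcons : (List.range (m + 1)).map (fun (j : Nat) => pvCombA rest (j : Int))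
          = pvCombA rest ((0 : Nat) : Int) ::
            (List.range m).map (fun (j : Nat) => pvCombA rest (((j + 1) : Nat) : Int)) := by
        rw [List.range_succ_eq_map]
        simp [List.map_map, Function.comp_def]
      rw [hcons]
      simp only [pvStep]
      rw [← hcons]
      apply List.ext_getElem
      · simp [List.length_zipWith]
      · intro i h1 h2
        simp only [List.length_map, List.length_range] at h2
        rcases i with _ | j
        · simp [pvCombA_zero]
        · have hj : j < m := by omega
          simp only [List.getElem_cons_succ, List.getElem_zipWith, List.getElem_map,
            List.getElem_range]
          by_cases hsh : (((x :: rest).length : Nat) : Int) < ((j + 1 : Nat) : Int)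
          · have h1' : pvCombA rest ((j : Nat) : Int) = [] := by
              apply pvCombA_short
              simp at hsh ⊢
              omega
            have h2' : pvCombA rest (((j + 1 : Nat)) : Int) = [] := by
              apply pvCombA_short
              simp at hsh ⊢
              omega
            rw [pvCombA_short _ _ hsh, h1', h2']
            simp
          · rw [pvCombA_cons _ _ _ (by push_cast; omega) hsh]
            have hc : (((j + 1 : Nat)) : Int) - 1 = ((j : Nat) : Int) := by push_cast; ring
            rw [hc]

lemma pvCombAB (lst : List String) (k : Int) (hk : 0 ≤ k) :
    pvCombA lst k = pvCombB lst k := by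
  unfold pvCombB
  rw [if_neg (by omega : ¬ k < 0)]
  rw [pvTable_spec]
  rw [List.getD_eq_getElem _ _ (by simp)]
  simp only [List.getElem_map, List.getElem_range]
  rw [Int.toNat_of_nonneg hk]

lemma pvLookup_mem (l : List (String × Int)) (hnd : (l.map Prod.fst).Nodup)
    (p : String × Int) (hp : p ∈ l) : l.lookup p.1 = some p.2 := by
  induction l with
  | nil => cases hp
  | cons q t ih =>
      simp only [List.map_cons, List.nodup_cons] at hnd
      rcases List.mem_cons.mp hp with rfl | hp'
      · simp [List.lookup]
      · have hne : q.1 ≠ p.1 := by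
          intro h
          exact hnd.1 (h ▸ List.mem_map_of_mem hp')
        simp [List.lookup, beq_eq_false_iff_ne.mpr (Ne.symm hne), ih hnd.2 hp']

-- ===== VERDICT (by name: the statement is the Claim_ definition above) =====
theorem no_oversubscribed_rooms_spec : Claim_equal_no_oversubscribed_rooms := by
  intro sp rc _ hpre
  obtain ⟨hnd, hcap⟩ := hpre
  unfold Spec_no_oversubscribed_rooms no_oversubscribed_rooms no_oversubscribed_rooms_alt
  rw [PySem.List.foldl_ite_eq_foldl_filter, PySem.List.foldl_append_eq_flatMap,
    List.nil_append, List.flatMap_map]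
  apply List.flatMap_congr
  intro p hp
  have hp' : p ∈ rc := List.mem_of_mem_filter hp
  rw [pvLookup_mem rc hnd p hp']
  simp only [Option.getD_some]
  rw [pvCombAB _ _ (by have := hcap p hp'; omega)]
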